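-- pv_equiv track=rewrite | github.com/chongpeng-tech/python_learning | biye_sheji/src/build_pseudo_ner_data.py | label_tokens
-- ===== SOURCE A (Python) =====
-- ENTITY_PRIORITY = ("PER", "LOC")
--
-- def label_tokens(
--     tokens: list[str],
--     entity_lexicon: dict[str, set[str]],
--     max_window: int,
-- ) -> list[str]:
--     if max_window <= 0:
--         return ["O"] * len(tokens)
--
--     labels = ["O"] * len(tokens)
--     i = 0
--     while i < len(tokens):
--         matched_end = -1
--         matched_type = None
--         window_end = min(len(tokens), i + max_window)
--         for j in range(window_end, i, -1):
--             candidate = "".join(tokens[i:j])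
--             for entity_type in ENTITY_PRIORITY:
--                 if candidate in entity_lexicon.get(entity_type, set()):
--                     matched_type = entity_type
--                     matched_end = j
--                     break
--             if matched_end != -1:
--                 break
--
--         if matched_end == -1:
--             i += 1
--             continue
--
--         labels[i] = f"B-{matched_type}"
--         for k in range(i + 1, matched_end):
--             labels[k] = f"I-{matched_type}"
--         i = matched_end
--     return labels
-- ===== SOURCE B (Python) =====
-- def label_tokens(tokens, entity_lexicon, max_window):
--     n = len(tokens)
--     if max_window <= 0:
--         return ["O"] * n
--     per = entity_lexicon.get("PER", set())
--     loc = entity_lexicon.get("LOC", set())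
--     out = []
--     i = 0
--     while i < n:
--         # single upward pass: grow the candidate incrementally, remember the
--         # last (= longest) match; PER beats LOC at equal length
--         cand = ""
--         best = None
--         for j in range(i, min(n, i + max_window)):
--             cand += tokens[j]
--             if cand in per:
--                 best = (j + 1, "PER")
--             elif cand in loc:
--                 best = (j + 1, "LOC")
--         if best is None:
--             out.append("O")
--             i += 1
--         else:
--             end, t = best
--             out.append("B-" + t)
--             out.extend(["I-" + t] * (end - i - 1))
--             i = end
--     return out
-- ===== Notes on version B (the rewrite author's own statement) =====
-- stated objective: alternative
-- what changed: B scans each position once upward, growing the candidate string incrementally and remembering the last (= longest, PER-over-LOC) match, and emits the output list forward, instead of A's downward scan that re-joins every window from scratch into a fresh candidate and mutates a preallocated label array.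
import Mathlib
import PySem

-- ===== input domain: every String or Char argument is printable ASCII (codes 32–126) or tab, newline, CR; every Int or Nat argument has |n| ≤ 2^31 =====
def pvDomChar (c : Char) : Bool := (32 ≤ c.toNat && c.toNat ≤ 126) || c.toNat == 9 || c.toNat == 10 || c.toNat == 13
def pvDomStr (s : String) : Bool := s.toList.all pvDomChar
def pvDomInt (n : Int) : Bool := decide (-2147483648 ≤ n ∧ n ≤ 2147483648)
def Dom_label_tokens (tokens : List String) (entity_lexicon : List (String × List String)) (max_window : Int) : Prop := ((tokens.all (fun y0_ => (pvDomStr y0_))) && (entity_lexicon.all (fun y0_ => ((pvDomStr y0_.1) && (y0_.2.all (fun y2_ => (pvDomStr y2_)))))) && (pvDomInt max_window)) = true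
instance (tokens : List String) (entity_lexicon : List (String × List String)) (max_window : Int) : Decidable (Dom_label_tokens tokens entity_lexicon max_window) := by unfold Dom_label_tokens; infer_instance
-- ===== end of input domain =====

-- B replaces A's per-position downward scan (which re-joins every window from scratch)
-- by one upward pass per position that grows the candidate incrementally and keeps the
-- last (= longest) match, building the output list forward instead of mutating an array.

-- ===== PORT A =====

-- ENTITY_PRIORITY = ("PER", "LOC")
def entityPriority : List String := ["PER", "LOC"]

-- candidate = "".join(tokens[i:j])
def candA (tokens : List String) (i j : Nat) : String :=
  PySem.Str.join "" (PySem.List.slice tokens (some (i : Int)) (some (j : Int)))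

-- the inner 'for entity_type in ENTITY_PRIORITY: … break' loop: first type whose set holds cand
def tryEntity (entity_lexicon : List (String × List String)) (cand : String) : Option String :=
  entityPriority.findSome? (fun et =>
    if cand ∈ PySem.Dict.getD (PySem.Dict.mk entity_lexicon) et [] then some et else none)

-- 'for j in range(window_end, i, -1): … break' — descending scan, first match wins
def findDownA (tokens : List String) (entity_lexicon : List (String × List String))
    (i : Nat) : Nat → Option (Nat × String)
  | 0 => none
  | j + 1 =>
    if i < j + 1 then
      match tryEntity entity_lexicon (candA tokens i (j + 1)) with
      | some t => some (j + 1, t)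
      | none => findDownA tokens entity_lexicon i j
    else none

-- 'for k in range(i + 1, matched_end): labels[k] = v' — m = matched_end - (i + 1) writes from s on
def fillI (labels : List String) (s : Nat) (v : String) : Nat → List String
  | 0 => labels
  | m + 1 => fillI (labels.set s v) (s + 1) v m

-- the 'while i < len(tokens)' loop; n = len(tokens), mwn = max_window (as Nat; max_window > 0
-- here); the loop advances i by at least 1 per iteration, so fuel = n suffices
def loopA (tokens : List String) (entity_lexicon : List (String × List String))
    (n mwn : Nat) (labels : List String) (i : Nat) : Nat → List String
  | 0 => labels
  | fuel + 1 =>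
    if i < n then
      match findDownA tokens entity_lexicon i (min n (i + mwn)) with
      | none => loopA tokens entity_lexicon n mwn labels (i + 1) fuel
      | some (j, t) =>
          loopA tokens entity_lexicon n mwn
            (fillI (labels.set i ("B-" ++ t)) (i + 1) ("I-" ++ t) (j - (i + 1))) j fuel
    else labels

def label_tokens (tokens : List String) (entity_lexicon : List (String × List String))
    (max_window : Int) : List String :=
  if max_window ≤ 0 then List.replicate tokens.length "O"
  else
    -- window_end = min(len(tokens), i + max_window): exact as min n (i + max_window.toNat) since max_window > 0
    loopA tokens entity_lexicon tokens.length max_window.toNat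
      (List.replicate tokens.length "O") 0 tokens.length

-- ===== PORT B =====

-- the 'for j in range(i, min(n, i + max_window))' pass: state (cand, best); cand += tokens[j],
-- remember the last match (PER before LOC at the same j); range over Nats is exact (0 ≤ i ≤ e)
def bestB (tokens per loc : List String) (i e : Nat) : Option (Nat × String) :=
  ((List.range' i (e - i)).foldl
    (fun (st : String × Option (Nat × String)) (j : Nat) =>
      let cand := st.1 ++ PySem.List.pyGetD tokens ((j : Nat) : Int) ""
      if cand ∈ per then (cand, some (j + 1, "PER"))
      else if cand ∈ loc then (cand, some (j + 1, "LOC"))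
      else (cand, st.2))
    ("", none)).2

-- the 'while i < n' loop of B, emitting the output forward (i advances ≥ 1 each turn: fuel = n)
def loopB (tokens per loc : List String) (n mwn i : Nat) : Nat → List String
  | 0 => []
  | fuel + 1 =>
    if i < n then
      match bestB tokens per loc i (min n (i + mwn)) with
      | none => "O" :: loopB tokens per loc n mwn (i + 1) fuel
      | some (j, t) =>
          ("B-" ++ t) :: (List.replicate (j - (i + 1)) ("I-" ++ t)
            ++ loopB tokens per loc n mwn j fuel)
    else []

def label_tokens_alt (tokens : List String) (entity_lexicon : List (String × List String))
    (max_window : Int) : List String :=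
  if max_window ≤ 0 then List.replicate tokens.length "O"
  else
    let per := PySem.Dict.getD (PySem.Dict.mk entity_lexicon) "PER" []
    let loc := PySem.Dict.getD (PySem.Dict.mk entity_lexicon) "LOC" []
    loopB tokens per loc tokens.length max_window.toNat 0 tokens.length

-- ===== PRECONDITION & SPEC =====
def Spec_label_tokens (tokens : List String) (entity_lexicon : List (String × List String)) (max_window : Int) (out : List String) : Prop := out = label_tokens_alt tokens entity_lexicon max_window
instance (tokens : List String) (entity_lexicon : List (String × List String)) (max_window : Int) (out : List String) : Decidable (Spec_label_tokens tokens entity_lexicon max_window out) := by unfold Spec_label_tokens; infer_instance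

-- ===== CLAIM (what is proved, stated in full; the proofs are below) =====
def Claim_equal_label_tokens : Prop := ∀ (tokens : List String) (entity_lexicon : List (String × List String)) (max_window : Int), Dom_label_tokens tokens entity_lexicon max_window → Spec_label_tokens tokens entity_lexicon max_window (label_tokens tokens entity_lexicon max_window)

-- ===== LEMMAS AND PROOFS =====

theorem chars_join_nil (l : List (List Char)) : PySem.Chars.join [] l = l.flatten := by
  unfold PySem.Chars.join
  induction l with
  | nil => simp [List.intercalate]
  | cons a t ih =>
    cases t with
    | nil => simp [List.intercalate]
    | cons b t' =>
      simp only [List.intercalate] at ih ⊢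
      simp [List.intersperse] at ih ⊢
      exact ih

theorem candA_toList (tokens : List String) (i j : Nat) :
    (candA tokens i j).toList = (((tokens.drop i).take (j - i)).map String.toList).flatten := by
  simp [candA, PySem.Str.join, PySem.List.slice_natCast, chars_join_nil]

theorem candA_self (tokens : List String) (i : Nat) : candA tokens i i = "" := by
  rw [← String.toList_inj, candA_toList]; simp

theorem candA_append (tokens : List String) {i j : Nat} (hij : i ≤ j) (hj : j < tokens.length) :
    candA tokens i j ++ tokens[j] = candA tokens i (j + 1) := by
  rw [← String.toList_inj, String.toList_append, candA_toList, candA_toList]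
  have h1 : j + 1 - i = (j - i) + 1 := by omega
  rw [h1, List.take_add_one]
  have h2 : (tokens.drop i)[j - i]? = some tokens[j] := by
    rw [List.getElem?_drop]
    have : i + (j - i) = j := by omega
    rw [this, List.getElem?_eq_getElem hj]
  rw [h2]
  simp

-- the shared "match at end j+1" test
def gMatch (tokens per loc : List String) (i j : Nat) : Option (Nat × String) :=
  if candA tokens i (j + 1) ∈ per then some (j + 1, "PER")
  else if candA tokens i (j + 1) ∈ loc then some (j + 1, "LOC")
  else none

def upFold (tokens per loc : List String) (i : Nat) (L : List Nat)
    (acc : Option (Nat × String)) : Option (Nat × String) :=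
  L.foldl (fun a k => match gMatch tokens per loc i k with | some r => some r | none => a) acc

theorem bestB_go (tokens per loc : List String) (i : Nat) :
    ∀ (m j : Nat) (acc : Option (Nat × String)), i ≤ j → j + m ≤ tokens.length →
    ((List.range' j m).foldl
      (fun (st : String × Option (Nat × String)) (k : Nat) =>
        let cand := st.1 ++ PySem.List.pyGetD tokens ((k : Nat) : Int) ""
        if cand ∈ per then (cand, some (k + 1, "PER"))
        else if cand ∈ loc then (cand, some (k + 1, "LOC"))
        else (cand, st.2))
      (candA tokens i j, acc)).2
    = upFold tokens per loc i (List.range' j m) acc := by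
  intro m
  induction m with
  | zero => intro j acc _ _; simp [upFold]
  | succ m ih =>
    intro j acc hij hlen
    rw [List.range'_succ]
    have hj : j < tokens.length := by omega
    have hget : PySem.List.pyGetD tokens ((j : Nat) : Int) "" = tokens[j] := by
      simp [PySem.List.pyGetD_natCast, List.getD_eq_getElem?_getD, List.getElem?_eq_getElem hj]
    simp only [List.foldl_cons, upFold, gMatch]
    rw [hget, candA_append tokens hij hj]
    by_cases hp : candA tokens i (j + 1) ∈ per
    · simp only [if_pos hp]
      exact ih (j + 1) _ (by omega) (by omega)
    · by_cases hl : candA tokens i (j + 1) ∈ loc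
      · simp only [if_neg hp, if_pos hl]
        exact ih (j + 1) _ (by omega) (by omega)
      · simp only [if_neg hp, if_neg hl]
        exact ih (j + 1) _ (by omega) (by omega)

theorem bestB_eq (tokens per loc : List String) (i e : Nat) (he : e ≤ tokens.length) :
    bestB tokens per loc i e = upFold tokens per loc i (List.range' i (e - i)) none := by
  by_cases h : i ≤ e
  · have hgo := bestB_go tokens per loc i (e - i) i none (le_refl i) (by omega)
    rw [candA_self] at hgo
    exact hgo
  · have h0 : e - i = 0 := by omega
    simp [bestB, upFold, h0]

theorem tryEntity_eq (lex : List (String × List String)) (c : String) :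
    tryEntity lex c
      = if c ∈ PySem.Dict.getD (PySem.Dict.mk lex) "PER" [] then some "PER"
        else if c ∈ PySem.Dict.getD (PySem.Dict.mk lex) "LOC" [] then some "LOC" else none := by
  by_cases h1 : c ∈ PySem.Dict.getD (PySem.Dict.mk lex) "PER" [] <;>
    by_cases h2 : c ∈ PySem.Dict.getD (PySem.Dict.mk lex) "LOC" [] <;>
      simp [tryEntity, entityPriority, h1, h2]

theorem findDownA_eq_upFold (tokens : List String) (lex : List (String × List String)) (i : Nat)
    (per loc : List String)
    (hper : per = PySem.Dict.getD (PySem.Dict.mk lex) "PER" [])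
    (hloc : loc = PySem.Dict.getD (PySem.Dict.mk lex) "LOC" []) :
    ∀ e, findDownA tokens lex i e = upFold tokens per loc i (List.range' i (e - i)) none := by
  subst hper; subst hloc
  intro e
  induction e with
  | zero => simp [findDownA, upFold]
  | succ e ih =>
    rw [findDownA]
    by_cases hie : i < e + 1
    · rw [if_pos hie]
      have h1 : e + 1 - i = (e - i) + 1 := by omega
      have h2 : i + 1 * (e - i) = e := by omega
      rw [h1, List.range'_concat, h2]
      unfold upFold
      rw [List.foldl_append]
      simp only [List.foldl_cons, List.foldl_nil, gMatch]
      rw [tryEntity_eq]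
      by_cases hp : candA tokens i (e + 1) ∈ PySem.Dict.getD (PySem.Dict.mk lex) "PER" []
      · simp only [if_pos hp]
      · by_cases hl : candA tokens i (e + 1) ∈ PySem.Dict.getD (PySem.Dict.mk lex) "LOC" []
        · simp only [if_neg hp, if_pos hl]
        · simp only [if_neg hp, if_neg hl]
          exact ih
    · rw [if_neg hie]
      have h0 : e + 1 - i = 0 := by omega
      simp [upFold, h0]

theorem bestB_eq_findDownA (tokens : List String) (lex : List (String × List String))
    (per loc : List String)
    (hper : per = PySem.Dict.getD (PySem.Dict.mk lex) "PER" [])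
    (hloc : loc = PySem.Dict.getD (PySem.Dict.mk lex) "LOC" [])
    (i e : Nat) (he : e ≤ tokens.length) :
    bestB tokens per loc i e = findDownA tokens lex i e :=
  (bestB_eq tokens per loc i e he).trans
    (findDownA_eq_upFold tokens lex i per loc hper hloc e).symm

theorem findDownA_some {tokens : List String} {lex : List (String × List String)} {i : Nat} :
    ∀ {e j : Nat} {t : String}, findDownA tokens lex i e = some (j, t) → i < j ∧ j ≤ e := by
  intro e
  induction e with
  | zero => intro j t h; cases h
  | succ e ih =>
    intro j t h
    rw [findDownA] at h
    split at h
    · split at h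
      · cases h; omega
      · have := ih h; omega
    · cases h

theorem fillI_eq (v : String) :
    ∀ (m : Nat) (ls : List String) (s : Nat), s + m ≤ ls.length →
    fillI ls s v m = ls.take s ++ List.replicate m v ++ ls.drop (s + m) := by
  intro m
  induction m with
  | zero => intro ls s _; simp [fillI]
  | succ m ih =>
    intro ls s hlen
    have hs : s < ls.length := by omega
    rw [fillI, ih (ls.set s v) (s + 1) (by simp; omega)]
    have htake : (ls.set s v).take (s + 1) = ls.take s ++ [v] := by
      rw [List.take_set, List.set_eq_take_append_cons_drop]
      have hlt : s < (ls.take (s + 1)).length := by simp; omega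
      rw [if_pos hlt, List.take_take]
      have h1 : min s (s + 1) = s := by omega
      rw [h1]
      have h2 : (ls.take (s + 1)).drop (s + 1) = [] := by
        apply List.drop_eq_nil_of_le; simp
      rw [h2]
    have hdrop : (ls.set s v).drop (s + 1 + m) = ls.drop (s + 1 + m) := by
      rw [List.drop_set, if_pos (by omega)]
    rw [htake, hdrop]
    have h3 : s + 1 + m = s + (m + 1) := by omega
    rw [h3, List.replicate_succ]
    simp

theorem loop_eq (tokens : List String) (lex : List (String × List String))
    (per loc : List String)
    (hper : per = PySem.Dict.getD (PySem.Dict.mk lex) "PER" [])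
    (hloc : loc = PySem.Dict.getD (PySem.Dict.mk lex) "LOC" [])
    (mwn : Nat) :
    ∀ (fuel i : Nat) (labels : List String), tokens.length - i ≤ fuel →
      labels.length = tokens.length →
      (∀ k, i ≤ k → k < tokens.length → labels.getD k "" = "O") →
      loopA tokens lex tokens.length mwn labels i fuel
        = labels.take i ++ loopB tokens per loc tokens.length mwn i fuel := by
  intro fuel
  induction fuel with
  | zero =>
    intro i labels hfuel hlen _
    rw [loopA, loopB, List.take_of_length_le (by omega)]
    simp
  | succ fuel ih =>
    intro i labels hfuel hlen hO
    by_cases hi : i < tokens.length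
    · have he : min tokens.length (i + mwn) ≤ tokens.length := by omega
      have hbe : bestB tokens per loc i (min tokens.length (i + mwn))
          = findDownA tokens lex i (min tokens.length (i + mwn)) :=
        bestB_eq_findDownA tokens lex per loc hper hloc i _ he
      rw [loopA, loopB, if_pos hi, if_pos hi]
      split <;> rename_i hA
      · split <;> rename_i hB
        · rw [ih (i + 1) labels (by omega) hlen (fun k hk1 hk2 => hO k (by omega) hk2)]
          have : labels.take (i + 1) = labels.take i ++ ["O"] := by
            rw [List.take_add_one, List.getElem?_eq_getElem (by omega)]
            have := hO i (le_refl i) hi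
            rw [List.getD_eq_getElem?_getD, List.getElem?_eq_getElem (by omega)] at this
            simp at this
            simp [this]
          rw [this]
          simp
        · rw [hbe, hA] at hB; cases hB
      · rename_i j t
        split <;> rename_i hB
        · rw [hbe, hA] at hB; cases hB
        · rename_i j' t'
          rw [hbe, hA] at hB
          injection hB with hB
          injection hB with h1 h2
          subst h1; subst h2
          have hj := findDownA_some hA
          have hij : i < j := hj.1
          have hjn : j ≤ tokens.length := le_trans hj.2 he
          set Bt := "B-" ++ t with hBt
          set It := "I-" ++ t with hIt
          have hfill : fillI (labels.set i Bt) (i + 1) It (j - (i + 1))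
              = (labels.set i Bt).take (i + 1) ++ List.replicate (j - (i + 1)) It
                ++ (labels.set i Bt).drop (i + 1 + (j - (i + 1))) :=
            fillI_eq It (j - (i + 1)) _ _ (by simp; omega)
          have hj' : i + 1 + (j - (i + 1)) = j := by omega
          rw [hj'] at hfill
          have htake : (labels.set i Bt).take (i + 1) = labels.take i ++ [Bt] := by
            rw [List.take_set, List.set_eq_take_append_cons_drop]
            have hlt : i < (labels.take (i + 1)).length := by simp; omega
            rw [if_pos hlt, List.take_take]
            have h1 : min i (i + 1) = i := by omega
            rw [h1]
            have h2 : (labels.take (i + 1)).drop (i + 1) = [] := by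
              apply List.drop_eq_nil_of_le; simp
            rw [h2]
          have hdrop : (labels.set i Bt).drop j = labels.drop j := by
            rw [List.drop_set, if_pos hij]
          set labels' := fillI (labels.set i Bt) (i + 1) It (j - (i + 1)) with hlabels'
          have hrepr : labels' = (labels.take i ++ [Bt] ++ List.replicate (j - (i + 1)) It)
              ++ labels.drop j := by
            rw [hfill, htake, hdrop]
            try simp [List.append_assoc]
          have hplen : (labels.take i ++ [Bt] ++ List.replicate (j - (i + 1)) It).length = j := by
            simp; omega
          have hlen' : labels'.length = tokens.length := by
            rw [hrepr]; simp; omega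
          have hO' : ∀ k, j ≤ k → k < tokens.length → labels'.getD k "" = "O" := by
            intro k hk1 hk2
            rw [hrepr, List.getD_eq_getElem?_getD, List.getElem?_append_right (by omega),
              hplen, List.getElem?_drop]
            have hjk : j + (k - j) = k := by omega
            rw [hjk]
            have := hO k (by omega) hk2
            rwa [List.getD_eq_getElem?_getD] at this
          rw [ih j labels' (by omega) hlen' hO']
          have htakej : labels'.take j
              = labels.take i ++ [Bt] ++ List.replicate (j - (i + 1)) It := by
            rw [hrepr, List.take_left' hplen]
          rw [htakej]
          simp [List.append_assoc]
    · rw [loopA, loopB, if_neg hi, if_neg hi, List.take_of_length_le (by omega)]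
      simp

-- ===== VERDICT (by name: the statement is the Claim_ definition above) =====
theorem label_tokens_spec : Claim_equal_label_tokens := by
  intro tokens lex mw _
  unfold Spec_label_tokens label_tokens label_tokens_alt
  by_cases hmw : mw ≤ 0
  · rw [if_pos hmw, if_pos hmw]
  · rw [if_neg hmw, if_neg hmw]
    have h := loop_eq tokens lex _ _ rfl rfl mw.toNat tokens.length 0
      (List.replicate tokens.length "O") (by omega) (by simp)
      (by
        intro k _ hk
        simp [List.getD_eq_getElem?_getD, hk])
    simpa using h
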